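-- pv_equiv track=rewrite | github.com/DonMdas/academic-assistant-backend | planner_common.py | _iter_braced_dict_candidates
-- ===== SOURCE A (Python) =====
-- def _iter_braced_dict_candidates(text):
--     value = str(text or "")
--     if not value:
--         return
--
--     in_string = False
--     quote_char = ""
--     escaped = False
--     depth = 0
--     start_index = None
--
--     for index, char in enumerate(value):
--         if in_string:
--             if escaped:
--                 escaped = False
--             elif char == "\\":
--                 escaped = True
--             elif char == quote_char:
--                 in_string = False
--             continue
--
--         if char in {'"', "'"}:
--             in_string = True
--             quote_char = char
--             continue
--
--         if char == "{":
--             if depth == 0: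
--                 start_index = index
--             depth += 1
--             continue
--
--         if char == "}" and depth > 0:
--             depth -= 1
--             if depth == 0 and start_index is not None:
--                 yield value[start_index : index + 1]
--                 start_index = None
-- ===== SOURCE B (Python) =====
-- def _iter_braced_dict_candidates(text):
--     value = str(text or "")
--     n = len(value)
--     out = []
--     i = 0
--     depth = 0
--     start = 0
--     while i < n:
--         c = value[i]
--         if c == '"' or c == "'":
--             # consume the string literal
--             i += 1
--             while i < n:
--                 if value[i] == '\\':
--                     i += 2
--                 elif value[i] == c:
--                     i += 1
--                     break
--                 else:
--                     i += 1
--         elif c == '{':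
--             if depth == 0:
--                 start = i
--             depth += 1
--             i += 1
--         elif c == '}' and depth > 0:
--             depth -= 1
--             if depth == 0:
--                 out.append(value[start:i + 1])
--             i += 1
--         else:
--             i += 1
--     return out
-- ===== Notes on version B (the rewrite author's own statement) =====
-- stated objective: alternative
-- what changed: Replaced the flag-based single-pass state machine (in_string/quote_char/escaped carried through one for-loop over enumerate) by an index-driven while loop that, on meeting a quote, consumes the whole string literal in a dedicated inner loop (backslash skips the next char), so no in_string/escaped/quote_char state is carried across iterations and depth 0 needs no Option start sentinel.
import Mathlib
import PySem

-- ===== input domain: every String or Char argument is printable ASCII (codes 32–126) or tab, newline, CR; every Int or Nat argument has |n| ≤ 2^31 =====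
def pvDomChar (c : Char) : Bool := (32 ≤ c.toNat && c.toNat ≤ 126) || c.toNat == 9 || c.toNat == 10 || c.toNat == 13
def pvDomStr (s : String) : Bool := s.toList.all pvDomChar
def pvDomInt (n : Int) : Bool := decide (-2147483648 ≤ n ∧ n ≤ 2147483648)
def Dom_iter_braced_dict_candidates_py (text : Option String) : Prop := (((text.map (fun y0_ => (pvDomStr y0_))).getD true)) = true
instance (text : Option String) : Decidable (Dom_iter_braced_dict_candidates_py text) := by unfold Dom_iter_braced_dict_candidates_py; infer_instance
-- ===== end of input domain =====

-- B replaces A's flag-based state machine by an index-driven loop with an inner loop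
-- consuming string literals; same complexity (objective: alternative structure).
-- A is a Python generator; its yielded values are collected into the returned list.

-- ===== PORT A =====
-- per-iteration state of A's for-loop: in_string, quote_char, escaped, depth, start_index,
-- plus the list of values yielded so far.
structure PvAState where
  inString : Bool
  quote    : Char          -- Python's quote_char starts as ""; it is never compared before
                           -- being overwritten (only read while inString), so a Char with
                           -- an arbitrary initial value (' ') is behaviourally identical
  escaped  : Bool
  depth    : Int
  start    : Option Int
  acc      : List String

-- loop body of A, literally branch for branch (each `continue` = returning the new state)
def pvStepA (v : List Char) (st : PvAState) (p : Int × Char) : PvAState :=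
  let index := p.1
  let char  := p.2
  if st.inString then
    if st.escaped then { st with escaped := false }
    else if char == '\\' then { st with escaped := true }
    else if char == st.quote then { st with inString := false }
    else st
  else if char == '"' || char == '\'' then
    { st with inString := true, quote := char }
  else if char == '{' then
    { st with start := if st.depth == 0 then some index else st.start,
              depth := st.depth + 1 }
  else if (char == '}') ∧ 0 < st.depth then
    let d := st.depth - 1
    match st.start with
    | some s =>
        if d == 0 then
          -- yield value[start_index : index + 1]  (str slice = list slice on code points)
          { st with depth := d,
                    acc := st.acc ++ [String.ofList (PySem.List.slice v (some s) (some (index + 1)))],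
                    start := none }
        else { st with depth := d }
    | none => { st with depth := d }
  else st

def iter_braced_dict_candidates_py (text : Option String) : List String :=
  let value := text.getD ""          -- str(text or "")
  if value == "" then []             -- if not value: return
  else
    ((PySem.List.enumerate value.toList 0).foldl (pvStepA value.toList)
      ⟨false, ' ', false, 0, none, []⟩).acc

-- ===== PORT B =====
-- inner while loop of Source B: consume a string literal opened with quote q, starting at i;
-- returns the index just past the literal (or past the end if unterminated)
def pvSkipStr (v : List Char) (q : Char) (i : Nat) : Nat :=
  if h : i < v.length then
    if v[i] == '\\' then pvSkipStr v q (i + 2)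
    else if v[i] == q then i + 1
    else pvSkipStr v q (i + 1)
  else i
termination_by v.length - i

-- needed by bLoop's termination: the inner loop never moves the index backwards
theorem pvSkipStr_ge (v : List Char) (q : Char) (i : Nat) : i ≤ pvSkipStr v q i := by
  rw [pvSkipStr]
  split
  · split
    · exact le_trans (by omega) (pvSkipStr_ge v q (i + 2))
    · split
      · omega
      · exact le_trans (by omega) (pvSkipStr_ge v q (i + 1))
  · exact le_rfl
termination_by v.length - i

-- outer while loop of Source B
def pvBLoop (v : List Char) (i : Nat) (depth : Int) (start : Nat) (acc : List String) :
    List String :=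
  if h : i < v.length then
    let c := v[i]
    if c == '"' || c == '\'' then
      pvBLoop v (pvSkipStr v c (i + 1)) depth start acc
    else if c == '{' then
      pvBLoop v (i + 1) (depth + 1) (if depth == 0 then i else start) acc
    else if (c == '}') ∧ 0 < depth then
      let d := depth - 1
      pvBLoop v (i + 1) d start
        (if d == 0 then
           acc ++ [String.ofList (PySem.List.slice v (some (start : Int)) (some ((i : Int) + 1)))]
         else acc)
    else
      pvBLoop v (i + 1) depth start acc
  else acc
termination_by v.length - i
decreasing_by
  · have := pvSkipStr_ge v (v[i]) (i + 1); omega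
  · omega
  · omega
  · omega

def iter_braced_dict_candidates_py_alt (text : Option String) : List String :=
  let value := text.getD ""          -- str(text or "")
  pvBLoop value.toList 0 0 0 []

-- ===== PRECONDITION & SPEC =====
def Spec_iter_braced_dict_candidates_py (text : Option String) (out : List String) : Prop := out = iter_braced_dict_candidates_py_alt text
instance (text : Option String) (out : List String) : Decidable (Spec_iter_braced_dict_candidates_py text out) := by unfold Spec_iter_braced_dict_candidates_py; infer_instance

-- ===== CLAIM (what is proved, stated in full; the proofs are below) =====
def Claim_equal_iter_braced_dict_candidates_py : Prop := ∀ (text : Option String), Dom_iter_braced_dict_candidates_py text → Spec_iter_braced_dict_candidates_py text (iter_braced_dict_candidates_py text)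

-- ===== LEMMAS AND PROOFS =====

-- A's fold restarted from position i (state st), returning the yielded values
def pvAfold (v : List Char) (i : Nat) (st : PvAState) : List String :=
  ((PySem.List.enumerate (v.drop i) (i : Int)).foldl (pvStepA v) st).acc

theorem pvAfold_stop (v : List Char) (i : Nat) (st : PvAState) (h : v.length ≤ i) :
    pvAfold v i st = st.acc := by
  unfold pvAfold
  rw [List.drop_eq_nil_of_le h, PySem.List.enumerate_nil, List.foldl_nil]

theorem pvAfold_step (v : List Char) (i : Nat) (st : PvAState) (h : i < v.length) :
    pvAfold v i st = pvAfold v (i + 1) (pvStepA v st ((i : Int), v[i])) := by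
  unfold pvAfold
  rw [List.drop_eq_getElem_cons h, PySem.List.enumerate_cons, List.foldl_cons]
  norm_num

-- inside a string with escaped=True, the next char (if any) is consumed unconditionally
theorem pvAfold_esc (v : List Char) (i : Nat) (q : Char) (d : Int) (s : Option Int)
    (acc : List String) :
    pvAfold v i ⟨true, q, true, d, s, acc⟩ = pvAfold v (i + 1) ⟨true, q, false, d, s, acc⟩ := by
  by_cases h : i < v.length
  · rw [pvAfold_step v i _ h]
    simp [pvStepA]
  · rw [pvAfold_stop v i _ (by omega), pvAfold_stop v (i + 1) _ (by omega)]

-- A's in-string scanning from i equals jumping straight to pvSkipStr v q i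
theorem pvAfold_skip (v : List Char) (q : Char) (i : Nat) (d : Int) (s : Option Int)
    (acc : List String) :
    pvAfold v i ⟨true, q, false, d, s, acc⟩
      = pvAfold v (pvSkipStr v q i) ⟨false, q, false, d, s, acc⟩ := by
  by_cases h : i < v.length
  · rw [pvAfold_step v i _ h]
    by_cases hb : v[i] == '\\'
    · have hs : pvStepA v ⟨true, q, false, d, s, acc⟩ ((i : Int), v[i])
          = ⟨true, q, true, d, s, acc⟩ := by simp [pvStepA, hb]
      rw [hs, pvAfold_esc, pvAfold_skip v q (i + 2) d s acc]
      have : pvSkipStr v q i = pvSkipStr v q (i + 2) := by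
        rw [pvSkipStr]; simp [h, hb]
      rw [this]
    · by_cases hq : v[i] == q
      · have hs : pvStepA v ⟨true, q, false, d, s, acc⟩ ((i : Int), v[i])
            = ⟨false, q, false, d, s, acc⟩ := by simp [pvStepA, hb, hq]
        have hk : pvSkipStr v q i = i + 1 := by
          rw [pvSkipStr]; simp [h, hb, hq]
        rw [hs, hk]
      · have hs : pvStepA v ⟨true, q, false, d, s, acc⟩ ((i : Int), v[i])
            = ⟨true, q, false, d, s, acc⟩ := by simp [pvStepA, hb, hq]
        rw [hs, pvAfold_skip v q (i + 1) d s acc]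
        have : pvSkipStr v q i = pvSkipStr v q (i + 1) := by
          rw [pvSkipStr]; simp [h, hb, hq]
        rw [this]
  · have hk : pvSkipStr v q i = i := by rw [pvSkipStr]; simp [h]
    rw [hk, pvAfold_stop v i _ (by omega), pvAfold_stop v i _ (by omega)]
termination_by v.length - i
decreasing_by all_goals omega

-- main invariant: outside strings, A's fold from i agrees with B's loop from i,
-- provided depth ≥ 0 and (when depth > 0) A's start_index is B's start
theorem pvAfold_main (v : List Char) (i : Nat) (q : Char) (d : Int) (sA : Option Int)
    (sB : Nat) (acc : List String) (hd : 0 ≤ d) (hrel : 0 < d → sA = some (sB : Int)) :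
    pvAfold v i ⟨false, q, false, d, sA, acc⟩ = pvBLoop v i d sB acc := by
  by_cases h : i < v.length
  · rw [pvAfold_step v i _ h]
    by_cases hq : (v[i] == '"' || v[i] == '\'') = true
    · have hs : pvStepA v ⟨false, q, false, d, sA, acc⟩ ((i : Int), v[i])
          = ⟨true, v[i], false, d, sA, acc⟩ := by simp [pvStepA]; simp at hq; tauto
      rw [hs, pvAfold_skip,
          pvAfold_main v (pvSkipStr v (v[i]) (i + 1)) (v[i]) d sA sB acc hd hrel]
      conv_rhs => rw [pvBLoop]
      simp [h, hq]
    · by_cases ho : v[i] == '{'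
      · have hs : pvStepA v ⟨false, q, false, d, sA, acc⟩ ((i : Int), v[i])
            = ⟨false, q, false, d + 1, if d == 0 then some (i : Int) else sA, acc⟩ := by
          simp [pvStepA, hq, ho]
        rw [hs, pvAfold_main v (i + 1) q (d + 1)
              (if d == 0 then some (i : Int) else sA) (if d == 0 then i else sB) acc
              (by omega)
              (by intro _
                  by_cases h0 : d = 0
                  · simp [h0]
                  · simp [h0]; exact hrel (by omega))]
        conv_rhs => rw [pvBLoop]
        simp [h, hq, ho]
      · by_cases hc : (v[i] == '}') ∧ 0 < d
        · have hsA : sA = some (sB : Int) := hrel hc.2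
          have hs : pvStepA v ⟨false, q, false, d, sA, acc⟩ ((i : Int), v[i])
              = ⟨false, q, false, d - 1, if d - 1 == 0 then none else sA,
                 if d - 1 == 0 then
                   acc ++ [String.ofList (PySem.List.slice v (some (sB : Int)) (some ((i : Int) + 1)))]
                 else acc⟩ := by
            simp only [pvStepA, hsA]
            simp [hq, ho, hc.1, hc.2]
            by_cases h1 : d - 1 = 0 <;> simp [h1]
          rw [hs, pvAfold_main v (i + 1) q (d - 1)
                (if d - 1 == 0 then none else sA) sB _
                (by omega)
                (by intro hpos
                    have h1 : (d - 1 == 0) = false := by simp; omega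
                    simp [h1, hsA])]
          conv_rhs => rw [pvBLoop]
          simp [h, hq, ho, hc.1, hc.2]
        · have hc' : ¬ (v[i] = '}' ∧ 0 < d) := fun hx => hc ⟨by simp [hx.1], hx.2⟩
          have hs : pvStepA v ⟨false, q, false, d, sA, acc⟩ ((i : Int), v[i])
              = ⟨false, q, false, d, sA, acc⟩ := by
            simp [pvStepA, hq, ho]
            intro h' hd'; exact absurd ⟨h', hd'⟩ hc'
          rw [hs, pvAfold_main v (i + 1) q d sA sB acc hd hrel]
          conv_rhs => rw [pvBLoop]
          simp [h, hq, ho, hc']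
  · rw [pvAfold_stop v i _ (by omega)]
    rw [pvBLoop]; simp [h]
termination_by v.length - i
decreasing_by
  · have := pvSkipStr_ge v (v[i]) (i + 1); omega
  · omega
  · omega
  · omega

-- ===== VERDICT (by name: the statement is the Claim_ definition above) =====
theorem iter_braced_dict_candidates_py_spec : Claim_equal_iter_braced_dict_candidates_py := by
  intro text _
  unfold Spec_iter_braced_dict_candidates_py iter_braced_dict_candidates_py
    iter_braced_dict_candidates_py_alt
  by_cases hv : text.getD "" == ""
  · simp only [hv, if_pos]
    have : (text.getD "").toList = [] := by
      have : text.getD "" = "" := by simpa using hv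
      simp [this]
    rw [this, pvBLoop]
    simp
  · simp only [hv, if_neg, Bool.false_eq_true, not_false_iff]
    have := pvAfold_main (text.getD "").toList 0 ' ' 0 none 0 [] le_rfl (by omega)
    unfold pvAfold at this
    simpa using this
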